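-- pv_equiv track=rewrite | github.com/JakubWorek/algorithms_and_data_structures_course | 2019-2020/KOLOKWIA/kolokwium_pop_1/zad3.py | longest_incomplete
-- ===== SOURCE A (Python) =====
-- def longest_incomplete( A, k ):
--     # tu prosze wpisac wlasna implementacje
--     n = len(A)
--     _max = 0
--     C = []
--
--     for i in range(n):
--         if A[i] not in C: C+=[A[i]]
--
--     for num in range(k):
--         curr = 0
--         for i in range(n):
--             if A[i] == C[num]: curr = 0
--             else: curr += 1
--
--             _max = max(curr, _max)
--
--     return _max
-- ===== SOURCE B (Python) =====
-- def longest_incomplete(A, k):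
--     # One pass: for every value track its last index and the largest gap
--     # between consecutive occurrences; the longest run avoiding v is then
--     # max(largest inner gap, tail after the last occurrence).
--     n = len(A)
--     order = []   # distinct values in order of first occurrence
--     last = {}    # value -> last index seen
--     gap = {}     # value -> max run length avoiding the value, up to its last occurrence
--     for i, x in enumerate(A):
--         if x in last:
--             gap[x] = max(gap[x], i - last[x] - 1)
--         else:
--             order.append(x)
--             gap[x] = i
--         last[x] = i
--     best = 0
--     if k > 0:
--         for v in order[:k]:
--             best = max(best, gap[v], n - last[v] - 1)
--     return best
-- ===== Notes on version B (the rewrite author's own statement) =====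
-- stated objective: faster
-- what changed: Replaces A's rescan of the whole array for each of the first k distinct values by a single pass that records, per value, its last index and the largest gap between consecutive occurrences; the answer is the max over the first k distinct values of max(largest gap, tail after the last occurrence).
import Mathlib
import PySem

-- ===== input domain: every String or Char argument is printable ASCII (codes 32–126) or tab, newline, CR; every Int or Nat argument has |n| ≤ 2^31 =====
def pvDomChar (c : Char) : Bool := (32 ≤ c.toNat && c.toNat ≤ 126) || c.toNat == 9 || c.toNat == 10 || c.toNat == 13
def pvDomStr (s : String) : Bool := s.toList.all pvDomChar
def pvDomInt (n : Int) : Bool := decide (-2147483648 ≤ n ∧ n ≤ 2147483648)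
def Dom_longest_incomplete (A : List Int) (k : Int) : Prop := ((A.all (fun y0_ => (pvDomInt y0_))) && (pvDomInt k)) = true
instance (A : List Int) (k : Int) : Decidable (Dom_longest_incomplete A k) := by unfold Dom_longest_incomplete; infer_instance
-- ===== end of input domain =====

-- B replaces A's rescan of the whole array for each of the first k distinct values by one pass
-- recording, per value, its last index and largest gap between consecutive occurrences (objective: faster).

-- ===== PORT A =====
-- body of A's first loop: 'if A[i] not in C: C += [A[i]]'
def dedupStep (C : List Int) (x : Int) : List Int :=
  if C.contains x then C else C ++ [x]

-- body of A's inner loop: 'if A[i] == C[num]: curr = 0 else: curr += 1; _max = max(curr, _max)'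
def aInner (v : Int) (p : Int × Int) (x : Int) : Int × Int :=
  let curr : Int := if x = v then 0 else p.1 + 1
  (curr, max curr p.2)

def longest_incomplete (A : List Int) (k : Int) : Int :=
  let n : Int := (A.length : Int)
  let C : List Int := (PySem.List.pyRange 0 n 1).foldl
      (fun C i => dedupStep C (PySem.List.pyGetD A i 0)) []
  (PySem.List.pyRange 0 k 1).foldl
    (fun m num =>
      ((PySem.List.pyRange 0 n 1).foldl
        (fun (p : Int × Int) i => aInner (PySem.List.pyGetD C num 0) p (PySem.List.pyGetD A i 0))
        (0, m)).2) 0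

-- ===== PORT B =====
-- body of B's single pass: update last index and max gap for the current value
def bStep (st : List Int × PySem.Dict Int Int × PySem.Dict Int Int) (p : Int × Int) :
    List Int × PySem.Dict Int Int × PySem.Dict Int Int :=
  let order := st.1
  let last := st.2.1
  let gap := st.2.2
  let i := p.1
  let x := p.2
  if last.contains x then
    (order, last.insert x i, gap.insert x (max (gap.getD x 0) (i - last.getD x 0 - 1)))
  else
    (order ++ [x], last.insert x i, gap.insert x i)

def bState (A : List Int) : List Int × PySem.Dict Int Int × PySem.Dict Int Int :=
  (PySem.List.enumerate A 0).foldl bStep ([], PySem.Dict.empty, PySem.Dict.empty)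

def longest_incomplete_alt (A : List Int) (k : Int) : Int :=
  let n : Int := (A.length : Int)
  let st := bState A
  let order := st.1
  let last := st.2.1
  let gap := st.2.2
  if 0 < k then
    (PySem.List.slice order none (some k)).foldl
      (fun best v => max (max best (gap.getD v 0)) (n - last.getD v 0 - 1)) 0
  else 0

-- ===== PRECONDITION & SPEC =====
-- Pre_ excludes exactly the inputs where A raises IndexError: a nonempty A with k exceeding the
-- number of distinct values (then A evaluates C[num] for num ≥ len(C)).
def Pre_longest_incomplete (A : List Int) (k : Int) : Prop :=
  A = [] ∨ k ≤ ((PySem.List.dedup A).length : Int)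
instance (A : List Int) (k : Int) : Decidable (Pre_longest_incomplete A k) := by
  unfold Pre_longest_incomplete; infer_instance

def pvWitness_longest_incomplete : List Int × Int := ([1, 2, 1, 3], 2)

def Spec_longest_incomplete (A : List Int) (k : Int) (out : Int) : Prop :=
  out = longest_incomplete_alt A k
instance (A : List Int) (k : Int) (out : Int) : Decidable (Spec_longest_incomplete A k out) := by
  unfold Spec_longest_incomplete; infer_instance

-- ===== CLAIM (what is proved, stated in full; the proofs are below) =====
def Claim_equal_longest_incomplete : Prop := ∀ (A : List Int) (k : Int), Dom_longest_incomplete A k → Pre_longest_incomplete A k → Spec_longest_incomplete A k (longest_incomplete A k)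


-- ===== LEMMAS AND PROOFS =====

-- the pair computed by A's inner loop for value v, starting from (0, 0)
def pairA (v : Int) (P : List Int) : Int × Int := P.foldl (aInner v) (0, 0)

lemma aInner_self (v : Int) (p : Int × Int) : aInner v p v = (0, max 0 p.2) := by
  simp [aInner]

lemma aInner_ne (v x : Int) (p : Int × Int) (h : x ≠ v) :
    aInner v p x = (p.1 + 1, max (p.1 + 1) p.2) := by
  simp [aInner, h]

lemma foldA_nonneg (v : Int) (P : List Int) : ∀ (c m : Int), 0 ≤ c → 0 ≤ m →
    0 ≤ (P.foldl (aInner v) (c, m)).1 ∧ 0 ≤ (P.foldl (aInner v) (c, m)).2 := by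
  induction P with
  | nil => intro c m hc hm; exact ⟨hc, hm⟩
  | cons x P ih =>
    intro c m hc hm
    simp only [List.foldl_cons, aInner]
    by_cases hx : x = v
    · simp only [if_pos hx]
      exact ih 0 (max 0 m) le_rfl (le_max_left _ _)
    · simp only [if_neg hx]
      exact ih (c + 1) (max (c + 1) m) (by omega) (le_trans (by omega) (le_max_left _ _))

lemma foldA_shift (v : Int) (P : List Int) : ∀ (c m : Int), 0 ≤ c → 0 ≤ m →
    P.foldl (aInner v) (c, m)
      = ((P.foldl (aInner v) (c, 0)).1, max m (P.foldl (aInner v) (c, 0)).2) := by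
  induction P with
  | nil =>
    intro c m hc hm
    simp only [List.foldl_nil]
    rw [max_eq_left hm]
  | cons x P ih =>
    intro c m hc hm
    simp only [List.foldl_cons, aInner]
    by_cases hx : x = v
    · simp only [if_pos hx]
      rw [ih 0 (max 0 m) le_rfl (le_max_left _ _), ih 0 (max 0 0) le_rfl le_rfl]
      refine Prod.ext rfl ?_
      simp only []
      omega
    · simp only [if_neg hx]
      rw [ih (c + 1) (max (c + 1) m) (by omega) (le_trans (by omega) (le_max_left _ _)),
          ih (c + 1) (max (c + 1) 0) (by omega) (le_max_right _ _)]
      refine Prod.ext rfl ?_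
      simp only []
      omega

lemma foldA_not_mem (v : Int) (P : List Int) (h : v ∉ P) : ∀ (c : Int), 0 ≤ c →
    P.foldl (aInner v) (c, c) = (c + P.length, c + P.length) := by
  induction P with
  | nil => intro c hc; simp
  | cons x P ih =>
    intro c hc
    have hx : x ≠ v := fun hxv => h (by simp [hxv])
    have hP : v ∉ P := fun hvP => h (List.mem_cons_of_mem _ hvP)
    simp only [List.foldl_cons, aInner, if_neg hx]
    rw [max_eq_left (by omega : c ≤ c + 1)]
    rw [ih hP (c + 1) (by omega)]
    refine Prod.ext ?_ ?_ <;>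
      · simp only [List.length_cons]
        push_cast
        omega

lemma bState_append (P : List Int) (x : Int) :
    bState (P ++ [x]) = bStep (bState P) ((P.length : Int), x) := by
  unfold bState
  rw [PySem.List.enumerate_append, List.foldl_append]
  simp [PySem.List.enumerate_cons, PySem.List.enumerate_nil]

lemma pairA_append (v : Int) (P : List Int) (x : Int) :
    pairA v (P ++ [x]) = aInner v (pairA v P) x := by
  unfold pairA; rw [List.foldl_append]; rfl

lemma bState_inv (P : List Int) :
    (bState P).1 = PySem.Set.ofList P ∧
    ∀ v : Int,
      (v ∈ P →
        (bState P).2.1.get? v = some ((P.length : Int) - 1 - (pairA v P).1) ∧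
        ∃ g : Int, (bState P).2.2.get? v = some g ∧ 0 ≤ g ∧
          (pairA v P).2 = max g (pairA v P).1)
      ∧ (v ∉ P → (bState P).2.1.get? v = none ∧ (bState P).2.2.get? v = none) := by
  induction P using List.reverseRecOn with
  | nil =>
    refine ⟨rfl, fun v => ⟨fun h => absurd h (List.not_mem_nil), fun _ => ⟨rfl, rfl⟩⟩⟩
  | append_singleton P x ih =>
    obtain ⟨ihO, ihV⟩ := ih
    have hnn : ∀ w, 0 ≤ (pairA w P).1 ∧ 0 ≤ (pairA w P).2 :=
      fun w => foldA_nonneg w P 0 0 le_rfl le_rfl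
    rw [bState_append, PySem.Set.ofList_append_singleton]
    by_cases hxP : x ∈ P
    · -- x already seen: contains branch
      obtain ⟨hlast, g, hgap, hg0, hgm⟩ := (ihV x).1 hxP
      have hcont : (bState P).2.1.contains x = true := by
        rw [PySem.Dict.contains_eq_isSome_get?, hlast]; rfl
      simp only [bStep, hcont, if_pos]
      refine ⟨?_, ?_⟩
      · rw [PySem.Set.add_of_mem ((PySem.Set.mem_ofList _ _).mpr hxP)]
        exact ihO
      · intro v
        constructor
        · intro hv
          by_cases hvx : v = x
          · subst hvx
            have hc := (hnn v).1
            have hm := (hnn v).2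
            have hgd : (bState P).2.1.getD v 0 = (P.length : Int) - 1 - (pairA v P).1 := by
              rw [PySem.Dict.getD_eq_get?_getD, hlast]; rfl
            have hgg : (bState P).2.2.getD v 0 = g := by
              rw [PySem.Dict.getD_eq_get?_getD, hgap]; rfl
            rw [pairA_append, aInner_self, hgd, hgg]
            refine ⟨?_, ?_⟩
            · rw [PySem.Dict.get?_insert_self]
              congr 1
              simp only [List.length_append, List.length_cons, List.length_nil]
              push_cast
              omega
            · refine ⟨max g ((P.length : Int) - ((P.length : Int) - 1 - (pairA v P).1) - 1),
                PySem.Dict.get?_insert_self _ _ _, by omega, ?_⟩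
              simp only []
              omega
          · have hvP : v ∈ P := by
              rcases List.mem_append.mp hv with h | h
              · exact h
              · exact absurd (List.mem_singleton.mp h) hvx
            obtain ⟨hl, g', hg', hg'0, hg'm⟩ := (ihV v).1 hvP
            have hc := (hnn v).1
            rw [pairA_append, aInner_ne _ _ _ (fun h => hvx h.symm)]
            refine ⟨?_, ?_⟩
            · rw [PySem.Dict.get?_insert_of_ne _ _ hvx, hl]
              congr 1
              simp only [List.length_append, List.length_cons, List.length_nil]
              push_cast
              omega
            · refine ⟨g', by rw [PySem.Dict.get?_insert_of_ne _ _ hvx, hg'], hg'0, ?_⟩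
              simp only []
              omega
        · intro hv
          have hvx : v ≠ x := fun h => hv (by simp [h])
          have hvP : v ∉ P := fun h => hv (List.mem_append_left _ h)
          obtain ⟨h1, h2⟩ := (ihV v).2 hvP
          exact ⟨by rw [PySem.Dict.get?_insert_of_ne _ _ hvx]; exact h1,
                 by rw [PySem.Dict.get?_insert_of_ne _ _ hvx]; exact h2⟩
    · -- x not seen yet
      obtain ⟨hlast, hgap⟩ := (ihV x).2 hxP
      have hcont : (bState P).2.1.contains x = false := by
        rw [PySem.Dict.contains_eq_isSome_get?, hlast]; rfl
      simp only [bStep, hcont, Bool.false_eq_true, if_false]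
      refine ⟨?_, ?_⟩
      · rw [PySem.Set.add_of_not_mem (fun h => hxP ((PySem.Set.mem_ofList _ _).mp h))]
        rw [ihO]
      · intro v
        constructor
        · intro hv
          by_cases hvx : v = x
          · subst hvx
            have hpair : pairA v P = ((P.length : Int), (P.length : Int)) := by
              have := foldA_not_mem v P hxP 0 le_rfl
              simpa [pairA] using this
            rw [pairA_append, aInner_self, hpair]
            refine ⟨?_, ?_⟩
            · rw [PySem.Dict.get?_insert_self]
              congr 1
              simp only [List.length_append, List.length_cons, List.length_nil]
              push_cast
              omega
            · refine ⟨(P.length : Int), PySem.Dict.get?_insert_self _ _ _, by positivity, ?_⟩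
              simp only []
              omega
          · have hvP : v ∈ P := by
              rcases List.mem_append.mp hv with h | h
              · exact h
              · exact absurd (List.mem_singleton.mp h) hvx
            obtain ⟨hl, g', hg', hg'0, hg'm⟩ := (ihV v).1 hvP
            have hc := (hnn v).1
            rw [pairA_append, aInner_ne _ _ _ (fun h => hvx h.symm)]
            refine ⟨?_, ?_⟩
            · rw [PySem.Dict.get?_insert_of_ne _ _ hvx, hl]
              congr 1
              simp only [List.length_append, List.length_cons, List.length_nil]
              push_cast
              omega
            · refine ⟨g', by rw [PySem.Dict.get?_insert_of_ne _ _ hvx, hg'], hg'0, ?_⟩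
              simp only []
              omega
        · intro hv
          have hvx : v ≠ x := fun h => hv (by simp [h])
          have hvP : v ∉ P := fun h => hv (List.mem_append_left _ h)
          obtain ⟨h1, h2⟩ := (ihV v).2 hvP
          exact ⟨by rw [PySem.Dict.get?_insert_of_ne _ _ hvx]; exact h1,
                 by rw [PySem.Dict.get?_insert_of_ne _ _ hvx]; exact h2⟩

lemma foldl_range_take (C : List Int) (f : Int → Int → Int) :
    ∀ (m : Nat), m ≤ C.length → ∀ (init : Int),
    (PySem.List.pyRange 0 (m : Int) 1).foldl
        (fun acc num => f acc (PySem.List.pyGetD C num 0)) init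
      = (C.take m).foldl f init := by
  intro m
  induction m with
  | zero => intro _ init; simp [PySem.List.pyRange_one_eq_nil]
  | succ m ih =>
    intro hm init
    have hm' : m ≤ C.length := Nat.le_of_succ_le hm
    have hmc : m < C.length := hm
    have hcast : ((m + 1 : Nat) : Int) = (m : Int) + 1 := by push_cast; ring
    rw [hcast, PySem.List.pyRange_one_succ_right (by positivity), List.foldl_append,
        ih hm' init]
    have hget : PySem.List.pyGetD C (m : Int) 0 = C[m] := by
      rw [PySem.List.pyGetD_natCast]
      exact List.getD_eq_getElem _ _ hmc
    rw [List.take_add_one, List.foldl_append, List.getElem?_eq_getElem hmc]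
    simp [hget]

lemma fold_final (A : List Int) :
    ∀ (l : List Int), (∀ v ∈ l, v ∈ A) → ∀ (m : Int), 0 ≤ m →
    l.foldl (fun acc v => (A.foldl (aInner v) (0, acc)).2) m
      = l.foldl (fun best v => max (max best ((bState A).2.2.getD v 0))
          ((A.length : Int) - (bState A).2.1.getD v 0 - 1)) m := by
  intro l
  induction l with
  | nil => intro _ _ _; rfl
  | cons v l ih =>
    intro hl m hm
    have hv : v ∈ A := hl v (List.mem_cons_self)
    obtain ⟨hlast, g, hgap, hg0, hgm⟩ := ((bState_inv A).2 v).1 hv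
    have hnn := foldA_nonneg v A 0 0 le_rfl le_rfl
    have e1 : (A.foldl (aInner v) (0, m)).2 = max m (pairA v A).2 := by
      rw [foldA_shift v A 0 m le_rfl hm]; rfl
    have hgd : (bState A).2.1.getD v 0 = (A.length : Int) - 1 - (pairA v A).1 := by
      rw [PySem.Dict.getD_eq_get?_getD, hlast]; rfl
    have hgg : (bState A).2.2.getD v 0 = g := by
      rw [PySem.Dict.getD_eq_get?_getD, hgap]; rfl
    have e2 : max (max m ((bState A).2.2.getD v 0))
        ((A.length : Int) - (bState A).2.1.getD v 0 - 1) = max m (pairA v A).2 := by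
      rw [hgd, hgg]
      have h1 := hnn.1
      simp only [pairA] at *
      omega
    simp only [List.foldl_cons]
    rw [e1, e2]
    exact ih (fun w hw => hl w (List.mem_cons_of_mem _ hw)) _
      (le_trans hm (le_max_left _ _))

-- ===== VERDICT (by name: the statement is the Claim_ definition above) =====
theorem longest_incomplete_spec : Claim_equal_longest_incomplete := by
  intro A k _ hpre
  unfold Spec_longest_incomplete
  simp only [longest_incomplete, longest_incomplete_alt]
  rw [PySem.List.foldl_pyRange_zero_pyGetD' A 0 dedupStep []]
  have hC : A.foldl dedupStep [] = PySem.Set.ofList A := by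
    rw [PySem.Set.ofList_eq_foldl]
    rfl
  rw [hC]
  have hord : (bState A).1 = PySem.Set.ofList A := (bState_inv A).1
  rw [hord]
  by_cases hk0 : 0 < k
  · have hk0' : (0 : Int) ≤ k := le_of_lt hk0
    rw [if_pos hk0, PySem.List.slice_to _ hk0']
    simp only [PySem.List.foldl_pyRange_zero_pyGetD']
    by_cases hA : A = []
    · subst hA
      simp
    · have hklen : k.toNat ≤ (PySem.Set.ofList A).length := by
        rcases hpre with h | hk
        · exact absurd h hA
        · rw [PySem.List.dedup_eq_ofList] at hk
          omega
      have hrange : (PySem.List.pyRange 0 k 1).foldl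
          (fun acc num => (A.foldl
            (aInner (PySem.List.pyGetD (PySem.Set.ofList A) num 0)) (0, acc)).2) 0
          = ((PySem.Set.ofList A).take k.toNat).foldl
            (fun acc v => (A.foldl (aInner v) (0, acc)).2) 0 := by
        conv_lhs => rw [← Int.toNat_of_nonneg hk0']
        exact foldl_range_take (PySem.Set.ofList A)
          (fun acc v => (A.foldl (aInner v) (0, acc)).2) k.toNat hklen 0
      rw [hrange]
      exact fold_final A ((PySem.Set.ofList A).take k.toNat)
        (fun v hv => (PySem.Set.mem_ofList _ _).mp (List.mem_of_mem_take hv)) 0 le_rfl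
  · rw [if_neg hk0]
    rw [PySem.List.pyRange_one_eq_nil (show k ≤ 0 by omega)]
    rfl
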